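-- pv_equiv track=rewrite | github.com/dohyung1/x402-fpl-api | app/algorithms/chips.py | _count_dgw_teams
-- ===== SOURCE A (Python) =====
-- def _count_dgw_teams(fixtures: list, gameweek: int) -> int:
--     """Count how many teams have a double gameweek (2+ fixtures)."""
--     team_counts: dict[int, int] = {}
--     for fix in fixtures:
--         if fix.get("event") != gameweek:
--             continue
--         team_counts[fix["team_h"]] = team_counts.get(fix["team_h"], 0) + 1
--         team_counts[fix["team_a"]] = team_counts.get(fix["team_a"], 0) + 1
--     return sum(1 for c in team_counts.values() if c >= 2)
-- ===== SOURCE B (Python) =====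
-- def _count_dgw_teams(fixtures: list, gameweek: int) -> int:
--     """Count how many teams have a double gameweek (2+ fixtures)."""
--     teams = []
--     for fix in fixtures:
--         if fix.get("event") == gameweek:
--             teams.append(fix["team_h"])
--             teams.append(fix["team_a"])
--     teams.sort()
--     count = 0
--     i = 0
--     n = len(teams)
--     while i < n:
--         j = i + 1
--         while j < n and teams[j] == teams[i]:
--             j += 1
--         if j - i >= 2:
--             count += 1
--         i = j
--     return count
-- ===== Notes on version B (the rewrite author's own statement) =====
-- stated objective: alternative
-- what changed: Replaces the incremental count dictionary plus final sum-over-values pass with collect-sort-scan: gather the team occurrences of matching fixtures into a flat list, sort it, and count maximal runs of equal values of length >= 2.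
import Mathlib
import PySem

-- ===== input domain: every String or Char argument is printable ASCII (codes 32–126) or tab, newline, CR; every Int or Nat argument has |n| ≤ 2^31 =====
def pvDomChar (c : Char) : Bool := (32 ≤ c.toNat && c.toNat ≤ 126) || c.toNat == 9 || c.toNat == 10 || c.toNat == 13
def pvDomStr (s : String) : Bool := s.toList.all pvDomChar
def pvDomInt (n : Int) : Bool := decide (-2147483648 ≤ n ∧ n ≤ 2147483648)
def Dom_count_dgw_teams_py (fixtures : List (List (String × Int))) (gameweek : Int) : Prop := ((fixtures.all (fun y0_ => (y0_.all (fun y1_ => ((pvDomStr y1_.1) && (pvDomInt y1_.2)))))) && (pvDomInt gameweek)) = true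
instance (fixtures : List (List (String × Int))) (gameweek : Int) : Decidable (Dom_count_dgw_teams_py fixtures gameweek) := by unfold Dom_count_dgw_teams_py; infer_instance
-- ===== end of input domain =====

-- B replaces A's incremental count dictionary + final sum-over-values pass by collect-sort-scan:
-- gather the team occurrences, sort them, and count maximal runs of length ≥ 2. Objective: alternative.

-- ===== PORT A =====
-- fix["team_h"] / fix["team_a"] raise KeyError when the key is missing; Pre_ excludes exactly those
-- inputs, so 'getD … 0' is exact on the admitted domain.
def count_dgw_teams_py (fixtures : List (List (String × Int))) (gameweek : Int) : Int :=
  let team_counts : PySem.Dict Int Int :=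
    fixtures.foldl (fun d fix =>
      let fd := PySem.Dict.ofList fix
      if fd.get? "event" ≠ some gameweek then d
      else
        let d1 := d.insert (fd.getD "team_h" 0) (d.getD (fd.getD "team_h" 0) 0 + 1)
        d1.insert (fd.getD "team_a" 0) (d1.getD (fd.getD "team_a" 0) 0 + 1))
      PySem.Dict.empty
  team_counts.values.foldl (fun acc c => if 2 ≤ c then acc + 1 else acc) 0

-- ===== PORT B =====
-- the outer while loop of Source B over the sorted list: each step consumes one maximal run of equal
-- values (the inner 'while teams[j] == teams[i]' is the takeWhile/dropWhile of the run) and adds 1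
-- when the run has length ≥ 2 (j - i ≥ 2)
def pvRunScan : List Int → Int
  | [] => 0
  | x :: xs =>
      (if 2 ≤ 1 + (xs.takeWhile (fun y => y == x)).length then (1 : Int) else 0)
      + pvRunScan (xs.dropWhile (fun y => y == x))
termination_by l => l.length
decreasing_by
  simp only [List.length_cons]
  exact Nat.lt_succ_of_le (List.length_dropWhile_le _ _)

-- same KeyError spots as A (B reads fix["team_h"] / fix["team_a"] too); 'getD … 0' exact under Pre_.
def count_dgw_teams_py_alt (fixtures : List (List (String × Int))) (gameweek : Int) : Int :=
  let teams : List Int :=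
    fixtures.foldl (fun acc fix =>
      let fd := PySem.Dict.ofList fix
      if fd.get? "event" = some gameweek then
        acc ++ [fd.getD "team_h" 0, fd.getD "team_a" 0]
      else acc) []
  pvRunScan (PySem.List.sorted teams (fun x => x) false)

-- ===== PRECONDITION & SPEC =====
-- Pre_ excludes exactly the inputs where the Python raises KeyError: a fixture whose "event" value
-- equals gameweek but which lacks "team_h" or "team_a" (both A and B raise there).
def Pre_count_dgw_teams_py (fixtures : List (List (String × Int))) (gameweek : Int) : Prop :=
  ∀ fix ∈ fixtures, (PySem.Dict.ofList fix).get? "event" = some gameweek →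
    ((PySem.Dict.ofList fix).contains "team_h" ∧ (PySem.Dict.ofList fix).contains "team_a")
instance (fixtures : List (List (String × Int))) (gameweek : Int) : Decidable (Pre_count_dgw_teams_py fixtures gameweek) := by unfold Pre_count_dgw_teams_py; infer_instance

def pvWitness_count_dgw_teams_py : (List (List (String × Int))) × Int :=
  ([[("event", 5), ("team_h", 1), ("team_a", 2)], [("event", 5), ("team_h", 2), ("team_a", 3)]], 5)

def Spec_count_dgw_teams_py (fixtures : List (List (String × Int))) (gameweek : Int) (out : Int) : Prop := out = count_dgw_teams_py_alt fixtures gameweek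
instance (fixtures : List (List (String × Int))) (gameweek : Int) (out : Int) : Decidable (Spec_count_dgw_teams_py fixtures gameweek out) := by unfold Spec_count_dgw_teams_py; infer_instance

-- ===== CLAIM (what is proved, stated in full; the proofs are below) =====
def Claim_equal_count_dgw_teams_py : Prop := ∀ (fixtures : List (List (String × Int))) (gameweek : Int), Dom_count_dgw_teams_py fixtures gameweek → Pre_count_dgw_teams_py fixtures gameweek → Spec_count_dgw_teams_py fixtures gameweek (count_dgw_teams_py fixtures gameweek)

-- ===== LEMMAS AND PROOFS =====

-- the stream of team occurrences in matching fixtures, and A's per-occurrence counting step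
def pvOccs (fixtures : List (List (String × Int))) (gameweek : Int) : List Int :=
  fixtures.flatMap (fun fix =>
    if (PySem.Dict.ofList fix).get? "event" ≠ some gameweek then []
    else [(PySem.Dict.ofList fix).getD "team_h" 0, (PySem.Dict.ofList fix).getD "team_a" 0])

def pvStepA (d : PySem.Dict Int Int) (t : Int) : PySem.Dict Int Int := d.insert t (d.getD t 0 + 1)

theorem pv_foldA (fixtures : List (List (String × Int))) (gameweek : Int) :
    ∀ d : PySem.Dict Int Int,
      fixtures.foldl (fun d fix =>
        let fd := PySem.Dict.ofList fix
        if fd.get? "event" ≠ some gameweek then d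
        else
          let d1 := d.insert (fd.getD "team_h" 0) (d.getD (fd.getD "team_h" 0) 0 + 1)
          d1.insert (fd.getD "team_a" 0) (d1.getD (fd.getD "team_a" 0) 0 + 1)) d
      = (pvOccs fixtures gameweek).foldl pvStepA d := by
  induction fixtures with
  | nil => intro d; simp [pvOccs]
  | cons fix rest ih =>
    intro d
    rw [List.foldl_cons]
    by_cases hc : (PySem.Dict.ofList fix).get? "event" = some gameweek
    · rw [show pvOccs (fix :: rest) gameweek =
        [(PySem.Dict.ofList fix).getD "team_h" 0, (PySem.Dict.ofList fix).getD "team_a" 0]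
        ++ pvOccs rest gameweek from by simp [pvOccs, hc], List.foldl_append, ih]
      congr 1
      simp [hc, pvStepA]
    · rw [show pvOccs (fix :: rest) gameweek = pvOccs rest gameweek
        from by simp [pvOccs, hc], ih]
      congr 1
      simp [hc]

theorem pv_foldB (fixtures : List (List (String × Int))) (gameweek : Int) :
    ∀ acc : List Int,
      fixtures.foldl (fun acc fix =>
        let fd := PySem.Dict.ofList fix
        if fd.get? "event" = some gameweek then
          acc ++ [fd.getD "team_h" 0, fd.getD "team_a" 0]
        else acc) acc
      = acc ++ pvOccs fixtures gameweek := by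
  induction fixtures with
  | nil => intro acc; simp [pvOccs]
  | cons fix rest ih =>
    intro acc
    rw [List.foldl_cons]
    by_cases hc : (PySem.Dict.ofList fix).get? "event" = some gameweek
    · rw [show pvOccs (fix :: rest) gameweek =
        [(PySem.Dict.ofList fix).getD "team_h" 0, (PySem.Dict.ofList fix).getD "team_a" 0]
        ++ pvOccs rest gameweek from by simp [pvOccs, hc]]
      simp [hc, ih]
    · rw [show pvOccs (fix :: rest) gameweek = pvOccs rest gameweek
        from by simp [pvOccs, hc]]
      simp [hc, ih]

-- on a ≤-sorted list, the run scan counts exactly the distinct values of multiplicity ≥ 2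
theorem pv_runScan_sorted (s : List Int) (hs : s.Pairwise (· ≤ ·)) :
    pvRunScan s = ((s.dedup.countP (fun x => decide (2 ≤ s.count x)) : Nat) : Int) := by
  induction s using pvRunScan.induct with
  | case1 => simp [pvRunScan]
  | case2 x xs ih =>
    set t := xs.takeWhile (fun y => y == x) with ht
    set d := xs.dropWhile (fun y => y == x) with hd
    have hxs : xs = t ++ d := (List.takeWhile_append_dropWhile).symm
    have hts : ∀ y ∈ t, y = x := by
      intro y hy
      have := List.mem_takeWhile_imp hy
      simpa using this
    have hd_sub : d.Sublist xs := List.dropWhile_sublist _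
    have hd_pw : d.Pairwise (· ≤ ·) := (List.pairwise_cons.mp hs).2.sublist hd_sub
    have hxd : x ∉ d := by
      intro hxmem
      cases hdd : d with
      | nil => rw [hdd] at hxmem; simp at hxmem
      | cons h rest =>
        have hhne : ¬ (h == x) = true := by
          have := List.head?_dropWhile_not (fun y => y == x) xs
          rw [← hd, hdd] at this
          simpa using this
        have hhx : h ≠ x := by simpa using hhne
        have hxle : ∀ y ∈ xs, x ≤ y := fun y hy => (List.pairwise_cons.mp hs).1 y hy
        have hhxs : h ∈ xs := hd_sub.mem (by rw [hdd]; exact List.mem_cons_self)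
        have hxh : x < h := lt_of_le_of_ne (hxle h hhxs) (Ne.symm hhx)
        rw [hdd] at hxmem
        rcases List.mem_cons.mp hxmem with h1 | h2
        · exact hhx h1.symm
        · have hpw' : (h :: rest).Pairwise (· ≤ ·) := hdd ▸ hd_pw
          have : h ≤ x := (List.pairwise_cons.mp hpw').1 x h2
          exact absurd this (not_le.mpr hxh)
    have hcount_t : t.count x = t.length := List.count_eq_length.mpr (fun y hy => ((hts y hy) ▸ rfl))
    have hcount_x : (x :: xs).count x = 1 + t.length := by
      rw [hxs, List.count_cons_self, List.count_append, hcount_t,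
        List.count_eq_zero.mpr hxd]
      omega
    have hcount_d : ∀ y ∈ d, (x :: xs).count y = d.count y := by
      intro y hy
      have hyx : y ≠ x := fun h => hxd (h ▸ hy)
      have h1 : t.count y = 0 := List.count_eq_zero.mpr (fun hyt => hyx (hts y hyt))
      simp [hxs, List.count_append, h1, Ne.symm hyx]
    -- dedup (x :: xs) is a permutation of x :: dedup d
    have hmem_s : ∀ y, y ∈ x :: xs ↔ y ∈ x :: d.dedup := by
      intro y
      rw [hxs]
      simp only [List.mem_cons, List.mem_append, List.mem_dedup]
      constructor
      · rintro (h | h | h)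
        · exact Or.inl h
        · exact Or.inl (hts y h)
        · exact Or.inr h
      · rintro (h | h)
        · exact Or.inl h
        · exact Or.inr (Or.inr h)
    have hperm : (x :: xs).dedup.Perm (x :: d.dedup) := by
      apply (List.perm_ext_iff_of_nodup (List.nodup_dedup _) ?_).mpr
      · intro y
        rw [List.mem_dedup]
        exact hmem_s y
      · exact List.nodup_cons.mpr ⟨by simpa using hxd, List.nodup_dedup _⟩
    rw [show pvRunScan (x :: xs)
        = (if 2 ≤ 1 + t.length then (1 : Int) else 0) + pvRunScan d from by
      rw [pvRunScan]]
    rw [ih hd_pw]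
    rw [hperm.countP_eq]
    rw [List.countP_cons]
    have hcongr : d.dedup.countP (fun y => decide (2 ≤ (x :: xs).count y))
        = d.dedup.countP (fun y => decide (2 ≤ d.count y)) := by
      apply List.countP_congr
      intro y hy
      rw [hcount_d y (List.mem_dedup.mp hy)]
    rw [hcongr, hcount_x]
    by_cases h2 : 2 ≤ 1 + t.length
    · simp [h2]
      ring
    · simp [h2]

theorem pv_main (fixtures : List (List (String × Int))) (gameweek : Int) :
    count_dgw_teams_py fixtures gameweek = count_dgw_teams_py_alt fixtures gameweek := by
  simp only [count_dgw_teams_py, count_dgw_teams_py_alt]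
  rw [pv_foldA fixtures gameweek, pv_foldB fixtures gameweek]
  set occ := pvOccs fixtures gameweek with hocc
  -- A's side: reduce the counter fold to countP over the distinct occurrences
  have hctr : occ.foldl pvStepA PySem.Dict.empty = PySem.Dict.counter occ :=
    PySem.Dict.foldl_insert_getD_add_one_eq_counter occ
  rw [hctr]
  have hvals : (PySem.Dict.counter occ : PySem.Dict Int Int).values
      = (PySem.Set.ofList occ).map (fun k => (occ.count k : Int)) := by
    rw [PySem.Dict.values_eq_map_keys _ (PySem.Dict.nodup_keys_counter occ) 0,
      PySem.Dict.keys_counter]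
    exact List.map_congr_left (fun k _ => PySem.Dict.getD_counter occ k)
  rw [hvals, PySem.List.foldl_ite_add_one (fun c => 2 ≤ c), List.countP_map]
  -- B's side: the run scan over the sorted occurrences
  set s := PySem.List.sorted occ (fun x => x) false with hsrt
  have hperm_s : s.Perm occ := PySem.List.sorted_perm occ (fun x => x) false
  rw [List.nil_append, ← hsrt,
    pv_runScan_sorted s (by simpa using PySem.List.sorted_pairwise occ (fun x => x))]
  -- identify the two countP's
  have hpred : (fun y => decide (2 ≤ s.count y)) = fun y => decide (2 ≤ occ.count y) := by
    funext y
    rw [hperm_s.count_eq]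
  have hdperm : s.dedup.Perm occ.dedup := hperm_s.dedup
  have hsetperm : occ.dedup.Perm (PySem.Set.ofList occ) := by
    apply (List.perm_ext_iff_of_nodup (List.nodup_dedup _) (PySem.Set.nodup_ofList occ)).mpr
    intro y
    rw [List.mem_dedup, PySem.Set.mem_ofList]
  rw [hpred, (hdperm.trans hsetperm).countP_eq]
  have : ((fun c => decide (2 ≤ c)) ∘ fun k => ((occ.count k : Nat) : Int))
      = fun y => decide (2 ≤ occ.count y) := by
    funext y
    simp
  rw [this]
  omega

-- ===== VERDICT (by name: the statement is the Claim_ definition above) =====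
theorem count_dgw_teams_py_spec : Claim_equal_count_dgw_teams_py := by
  intro fixtures gameweek _ _
  unfold Spec_count_dgw_teams_py
  exact pv_main fixtures gameweek
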